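-- pv_equiv track=rewrite | github.com/bardock-2393/SoniqueDNA | backend/services/lastfm.py | _get_largest_image
-- ===== SOURCE A (Python) =====
-- from typing import Dict, List, Optional
--
-- def _get_largest_image(images: List[Dict]) -> str:
--     """Get the largest image URL from image array"""
--     if not images:
--         return ""
--
--     # Sort by size (extralarge > large > medium > small)
--     size_order = ["extralarge", "large", "medium", "small"]
--
--     for size in size_order:
--         for image in images:
--             if image.get("size") == size:
--                 return image.get("#text", "")
--
--     # Fallback to first image
--     return images[0].get("#text", "") if images else ""
-- ===== SOURCE B (Python) =====
-- def _get_largest_image(images):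
--     """Get the largest image URL from image array"""
--     if not images:
--         return ""
--     by_size = {}
--     for image in images:
--         size = image.get("size")
--         if size is not None and size not in by_size:
--             by_size[size] = image.get("#text", "")
--     for size in ["extralarge", "large", "medium", "small"]:
--         if size in by_size:
--             return by_size[size]
--     return images[0].get("#text", "")
-- ===== Notes on version B (the rewrite author's own statement) =====
-- stated objective: idiomatic
-- what changed: Replaces A's nested scan (for each priority size, rescan all images) with a single pass building a first-occurrence dict from size to URL, then one lookup per priority size.
import Mathlib
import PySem

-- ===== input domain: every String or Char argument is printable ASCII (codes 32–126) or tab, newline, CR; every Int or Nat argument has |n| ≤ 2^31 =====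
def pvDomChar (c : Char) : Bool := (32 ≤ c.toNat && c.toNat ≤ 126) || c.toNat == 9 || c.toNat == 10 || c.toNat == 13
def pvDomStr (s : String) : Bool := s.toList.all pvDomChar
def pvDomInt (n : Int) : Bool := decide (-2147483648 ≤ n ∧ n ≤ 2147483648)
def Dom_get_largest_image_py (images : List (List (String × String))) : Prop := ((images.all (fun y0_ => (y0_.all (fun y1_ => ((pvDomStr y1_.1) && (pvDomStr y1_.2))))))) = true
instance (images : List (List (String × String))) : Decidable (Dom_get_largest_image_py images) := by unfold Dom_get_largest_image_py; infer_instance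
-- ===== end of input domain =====

-- ===== PORT A =====
-- Header: B builds a first-occurrence size→URL dict in one pass instead of rescanning
-- the image list once per priority size (idiomatic restructuring, same results).

-- image.get(k): first-match lookup in the association list (Python dict .get)
def pvGet (img : List (String × String)) (k : String) : Option String :=
  (img.find? (fun p => p.1 == k)).map (·.2)

-- inner loop of A: first image whose "size" equals s, returning its "#text" default ""
def pvFindA (images : List (List (String × String))) (s : String) : Option String :=
  match images with
  | [] => none
  | img :: rest =>
      if pvGet img "size" = some s then some ((pvGet img "#text").getD "")
      else pvFindA rest s

-- outer loop of A over the size priority list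
def pvOuterA (sizes : List String) (images : List (List (String × String))) : Option String :=
  match sizes with
  | [] => none
  | s :: rest =>
      match pvFindA images s with
      | some t => some t
      | none => pvOuterA rest images

def get_largest_image_py (images : List (List (String × String))) : String :=
  match images with
  | [] => ""
  | img0 :: _ =>
      match pvOuterA ["extralarge", "large", "medium", "small"] images with
      | some t => t
      | none => (pvGet img0 "#text").getD ""

-- ===== PORT B =====
-- single pass: record the first "#text" seen for each "size"
def pvBuildB (images : List (List (String × String))) : PySem.Dict String String :=
  images.foldl (fun d img =>
    match pvGet img "size" with
    | none => d
    | some s => if d.contains s then d else d.insert s ((pvGet img "#text").getD ""))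
    PySem.Dict.empty

def pvPickB (sizes : List String) (d : PySem.Dict String String) (fb : String) : String :=
  match sizes with
  | [] => fb
  | s :: rest =>
      match d.get? s with
      | some t => t
      | none => pvPickB rest d fb

def get_largest_image_py_alt (images : List (List (String × String))) : String :=
  match images with
  | [] => ""
  | img0 :: _ =>
      pvPickB ["extralarge", "large", "medium", "small"] (pvBuildB images)
        ((pvGet img0 "#text").getD "")

-- ===== PRECONDITION & SPEC =====
def Spec_get_largest_image_py (images : List (List (String × String))) (out : String) : Prop := out = get_largest_image_py_alt images
instance (images : List (List (String × String))) (out : String) : Decidable (Spec_get_largest_image_py images out) := by unfold Spec_get_largest_image_py; infer_instance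

-- ===== CLAIM (what is proved, stated in full; the proofs are below) =====
def Claim_equal_get_largest_image_py : Prop := ∀ (images : List (List (String × String))), Dom_get_largest_image_py images → Spec_get_largest_image_py images (get_largest_image_py images)

-- ===== LEMMAS AND PROOFS =====

-- the dict built by B answers exactly A's inner scan
theorem get?_buildB_aux (images : List (List (String × String)))
    (d : PySem.Dict String String) (s : String) :
    (images.foldl (fun d img =>
      match pvGet img "size" with
      | none => d
      | some s => if d.contains s then d else d.insert s ((pvGet img "#text").getD ""))
      d).get? s
      = ((d.get? s).or (pvFindA images s)) := by
  induction images generalizing d with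
  | nil => simp [pvFindA]
  | cons img rest ih =>
      simp only [List.foldl_cons, ih, pvFindA]
      cases hsz : pvGet img "size" with
      | none =>
          simp
      | some s' =>
          by_cases hc : d.contains s' = true
          · simp only [hc, if_true]
            by_cases hss : s' = s
            · subst hss
              have : (d.get? s').isSome := by
                rw [← PySem.Dict.contains_eq_isSome_get?]; exact hc
              cases hget : d.get? s' with
              | none => rw [hget] at this; simp at this
              | some t => simp
            · have : ¬ (some s' = some s) := by simp [hss]
              simp [this]
          · simp only [Bool.not_eq_true] at hc
            simp only [hc, Bool.false_eq_true, if_false]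
            by_cases hss : s' = s
            · subst hss
              have hnone : d.get? s' = none := by
                cases hget : d.get? s' with
                | none => rfl
                | some t =>
                    rw [PySem.Dict.contains_eq_isSome_get?, hget] at hc
                    simp at hc
              rw [PySem.Dict.get?_insert_self, hnone]
              simp
            · rw [PySem.Dict.get?_insert, if_neg (fun h => hss (Eq.symm h))]
              have hne : ¬ (some s' = some s) := by simp [hss]
              simp [hne]

theorem get?_buildB (images : List (List (String × String))) (s : String) :
    (pvBuildB images).get? s = pvFindA images s := by
  unfold pvBuildB
  rw [get?_buildB_aux]
  simp [PySem.Dict.get?_empty]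

theorem pick_eq_outer (sizes : List String) (images : List (List (String × String))) (fb : String) :
    pvPickB sizes (pvBuildB images) fb
      = (match pvOuterA sizes images with | some t => t | none => fb) := by
  induction sizes with
  | nil => simp [pvPickB, pvOuterA]
  | cons s rest ih =>
      simp only [pvPickB, pvOuterA, get?_buildB]
      cases pvFindA images s with
      | none => simpa using ih
      | some t => simp

-- ===== VERDICT (by name: the statement is the Claim_ definition above) =====
theorem get_largest_image_py_spec : Claim_equal_get_largest_image_py := by
  intro images _
  unfold Spec_get_largest_image_py get_largest_image_py get_largest_image_py_alt
  cases images with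
  | nil => rfl
  | cons img0 rest =>
      dsimp only
      rw [pick_eq_outer]
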